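-- pv_equiv track=rewrite | github.com/prerna-patil26/Fake-News-Detection | app.py | handle_chat_query
-- ===== SOURCE A (Python) =====
-- def handle_chat_query(query):
--     # Model-related questions and responses
--     model_responses = {
--         "how does this model work": [
--             "1. Analyzes text patterns using machine learning",
--             "2. Trained on verified real and fake news datasets",
--             "3. Evaluates multiple linguistic features"
--         ],
--         "how accurate is this": [
--             "1. Accuracy around 85-90% on test data",
--             "2. Performance varies by news category",
--             "3. Always verify with other sources"
--         ],
--         "what features does it check": [
--             "1. Sentiment and emotional language",
--             "2. Readability scores",
--             "3. Presence of common fake news markers"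
--         ],
--         "how to spot fake news": [
--             "1. Check multiple reputable sources",
--             "2. Verify author credentials",
--             "3. Look for supporting evidence"
--         ],
--         "what makes news fake": [
--             "1. Misleading headlines",
--             "2. Lack of credible sources",
--             "3. Emotional manipulation"
--         ]
--     }
--
--     # Suggested model-related questions
--     suggested_questions = [
--         "How does this model work?",
--         "How accurate is the model?",
--         "What features does the model check?",
--         "How can I spot fake news?",
--         "What makes news fake?",
--         "Can you explain the confidence score?",
--         "What is LIME explanation?",
--         "How to verify news authenticity?"
--     ]
--
--     query_lower = query.lower()
--
--     # Check for model-related questions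
--     for question, response in model_responses.items():
--         if question in query_lower:
--             return response
--
--     # Check for partial matches
--     if any(keyword in query_lower for keyword in ["work", "model", "algorithm"]):
--         return model_responses["how does this model work"]
--     elif any(keyword in query_lower for keyword in ["accurate", "precision", "reliable"]):
--         return model_responses["how accurate is this"]
--     elif any(keyword in query_lower for keyword in ["feature", "check", "look for"]):
--         return model_responses["what features does it check"]
--     elif any(keyword in query_lower for keyword in ["spot", "identify", "detect"]):
--         return model_responses["how to spot fake news"]
--     elif any(keyword in query_lower for keyword in ["fake", "false", "misinformation"]):
--         return model_responses["what makes news fake"]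
--
--     # For unrelated questions
--     response = [
--         "I specialize in fake news detection. Here are some questions I can help with:",
--         "Try asking about:"
--     ]
--     response.extend([f"- {question}" for question in suggested_questions])
--     return response
-- ===== SOURCE B (Python) =====
-- # Match-set + arg-min strategy: collect the priorities of ALL matching
-- # triggers from one flat trigger list, pick the minimum priority, and map
-- # it to a response (priority % 5), instead of an early-return cascade.
-- TRIGGERS = [
--     ("how does this model work", 0),
--     ("how accurate is this", 1),
--     ("what features does it check", 2),
--     ("how to spot fake news", 3),
--     ("what makes news fake", 4),
--     ("work", 5), ("model", 5), ("algorithm", 5),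
--     ("accurate", 6), ("precision", 6), ("reliable", 6),
--     ("feature", 7), ("check", 7), ("look for", 7),
--     ("spot", 8), ("identify", 8), ("detect", 8),
--     ("fake", 9), ("false", 9), ("misinformation", 9),
-- ]
--
-- RESPONSES = [
--     ["1. Analyzes text patterns using machine learning",
--      "2. Trained on verified real and fake news datasets",
--      "3. Evaluates multiple linguistic features"],
--     ["1. Accuracy around 85-90% on test data",
--      "2. Performance varies by news category",
--      "3. Always verify with other sources"],
--     ["1. Sentiment and emotional language",
--      "2. Readability scores",
--      "3. Presence of common fake news markers"],
--     ["1. Check multiple reputable sources",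
--      "2. Verify author credentials",
--      "3. Look for supporting evidence"],
--     ["1. Misleading headlines",
--      "2. Lack of credible sources",
--      "3. Emotional manipulation"],
-- ]
--
-- SUGGESTED_QUESTIONS = [
--     "How does this model work?",
--     "How accurate is the model?",
--     "What features does the model check?",
--     "How can I spot fake news?",
--     "What makes news fake?",
--     "Can you explain the confidence score?",
--     "What is LIME explanation?",
--     "How to verify news authenticity?",
-- ]
--
--
-- def handle_chat_query(query):
--     ql = query.lower()
--     matched = [p for t, p in TRIGGERS if t in ql]
--     if matched:
--         return RESPONSES[min(matched) % 5]
--     return [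
--         "I specialize in fake news detection. Here are some questions I can help with:",
--         "Try asking about:",
--     ] + ["- " + q for q in SUGGESTED_QUESTIONS]
-- ===== Notes on version B (the rewrite author's own statement) =====
-- stated objective: alternative
-- what changed: Replaces A's early-return cascade (dict-iteration pass then five-branch elif chain) with a match-set strategy: one flat (trigger, priority) list is filtered for all matching triggers, the minimum priority is taken, and priority % 5 indexes the response table.
import Mathlib
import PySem

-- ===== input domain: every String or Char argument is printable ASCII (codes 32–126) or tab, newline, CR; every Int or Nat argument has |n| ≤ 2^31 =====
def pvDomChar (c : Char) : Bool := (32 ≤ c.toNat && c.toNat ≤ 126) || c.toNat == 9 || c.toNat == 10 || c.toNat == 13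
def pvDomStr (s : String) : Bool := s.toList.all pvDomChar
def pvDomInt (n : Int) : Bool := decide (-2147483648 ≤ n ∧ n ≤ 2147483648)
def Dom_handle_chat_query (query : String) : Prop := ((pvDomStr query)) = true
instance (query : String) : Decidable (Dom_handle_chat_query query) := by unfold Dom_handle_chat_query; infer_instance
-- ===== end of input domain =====

-- B replaces A's early-return cascade (dict pass, then elif chain) with a match-set
-- strategy: filter one flat (trigger, priority) list, take the minimum priority,
-- map it to a response via priority % 5 (alternative decomposition, same cost).

-- ===== PORT A =====
-- the literal dict (insertion order), as a PySem.Dict = association list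
def pvA_model_responses : PySem.Dict String (List String) := PySem.Dict.mk  -- dict literal: distinct keys, insertion order
  [("how does this model work",
    ["1. Analyzes text patterns using machine learning",
     "2. Trained on verified real and fake news datasets",
     "3. Evaluates multiple linguistic features"]),
   ("how accurate is this",
    ["1. Accuracy around 85-90% on test data",
     "2. Performance varies by news category",
     "3. Always verify with other sources"]),
   ("what features does it check",
    ["1. Sentiment and emotional language",
     "2. Readability scores",
     "3. Presence of common fake news markers"]),
   ("how to spot fake news",
    ["1. Check multiple reputable sources",
     "2. Verify author credentials",
     "3. Look for supporting evidence"]),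
   ("what makes news fake",
    ["1. Misleading headlines",
     "2. Lack of credible sources",
     "3. Emotional manipulation"])]

def pvA_suggested_questions : List String :=
  ["How does this model work?",
   "How accurate is the model?",
   "What features does the model check?",
   "How can I spot fake news?",
   "What makes news fake?",
   "Can you explain the confidence score?",
   "What is LIME explanation?",
   "How to verify news authenticity?"]

-- 'for question, response in model_responses.items(): if question in query_lower: return response'
def pvA_loop (items : List (String × List String)) (ql : String) : Option (List String) :=
  match items with
  | [] => none
  | (question, response) :: rest =>
      if PySem.Str.isIn question ql then some response else pvA_loop rest ql

def handle_chat_query (query : String) : List String :=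
  let query_lower := PySem.Str.lower query
  match pvA_loop (PySem.Dict.items pvA_model_responses) query_lower with
  | some response => response
  | none =>
    -- the elif chain; dict lookups use getD [] — exact here, every key is present
    if ["work", "model", "algorithm"].any (fun keyword => PySem.Str.isIn keyword query_lower) then
      PySem.Dict.getD pvA_model_responses "how does this model work" []
    else if ["accurate", "precision", "reliable"].any (fun keyword => PySem.Str.isIn keyword query_lower) then
      PySem.Dict.getD pvA_model_responses "how accurate is this" []
    else if ["feature", "check", "look for"].any (fun keyword => PySem.Str.isIn keyword query_lower) then
      PySem.Dict.getD pvA_model_responses "what features does it check" []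
    else if ["spot", "identify", "detect"].any (fun keyword => PySem.Str.isIn keyword query_lower) then
      PySem.Dict.getD pvA_model_responses "how to spot fake news" []
    else if ["fake", "false", "misinformation"].any (fun keyword => PySem.Str.isIn keyword query_lower) then
      PySem.Dict.getD pvA_model_responses "what makes news fake" []
    else
      ["I specialize in fake news detection. Here are some questions I can help with:",
       "Try asking about:"] ++
        pvA_suggested_questions.map (fun question => "- " ++ question)

-- ===== PORT B =====
def pvB_TRIGGERS : List (String × Int) :=
  [("how does this model work", 0),
   ("how accurate is this", 1),
   ("what features does it check", 2),
   ("how to spot fake news", 3),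
   ("what makes news fake", 4),
   ("work", 5), ("model", 5), ("algorithm", 5),
   ("accurate", 6), ("precision", 6), ("reliable", 6),
   ("feature", 7), ("check", 7), ("look for", 7),
   ("spot", 8), ("identify", 8), ("detect", 8),
   ("fake", 9), ("false", 9), ("misinformation", 9)]

def pvB_RESPONSES : List (List String) :=
  [["1. Analyzes text patterns using machine learning",
    "2. Trained on verified real and fake news datasets",
    "3. Evaluates multiple linguistic features"],
   ["1. Accuracy around 85-90% on test data",
    "2. Performance varies by news category",
    "3. Always verify with other sources"],
   ["1. Sentiment and emotional language",
    "2. Readability scores",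
    "3. Presence of common fake news markers"],
   ["1. Check multiple reputable sources",
    "2. Verify author credentials",
    "3. Look for supporting evidence"],
   ["1. Misleading headlines",
    "2. Lack of credible sources",
    "3. Emotional manipulation"]]

def pvB_SUGGESTED : List String :=
  ["How does this model work?",
   "How accurate is the model?",
   "What features does the model check?",
   "How can I spot fake news?",
   "What makes news fake?",
   "Can you explain the confidence score?",
   "What is LIME explanation?",
   "How to verify news authenticity?"]

def handle_chat_query_alt (query : String) : List String :=
  let ql := PySem.Str.lower query
  -- matched = [p for t, p in TRIGGERS if t in ql]
  let matched := pvB_TRIGGERS.filterMap (fun tp => if PySem.Str.isIn tp.1 ql then some tp.2 else none)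
  -- 'if matched: return RESPONSES[min(matched) % 5]'; min(xs) = PySem.List.min? with identity key
  match PySem.List.min? matched (fun x => x) with
  | some m => (PySem.List.pyGet? pvB_RESPONSES (PySem.Int.mod m 5)).getD []  -- index always in range here
  | none =>
    ["I specialize in fake news detection. Here are some questions I can help with:",
     "Try asking about:"] ++ pvB_SUGGESTED.map (fun q => "- " ++ q)

-- ===== PRECONDITION & SPEC =====
def Spec_handle_chat_query (query : String) (out : List String) : Prop := out = handle_chat_query_alt query
instance (query : String) (out : List String) : Decidable (Spec_handle_chat_query query out) := by unfold Spec_handle_chat_query; infer_instance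

-- ===== CLAIM (what is proved, stated in full; the proofs are below) =====
def Claim_equal_handle_chat_query : Prop := ∀ (query : String), Dom_handle_chat_query query → Spec_handle_chat_query query (handle_chat_query query)

-- ===== LEMMAS AND PROOFS =====

-- first matching priority of a flat (trigger, priority) list
def pvFirstP (L : List (String × Int)) (ql : String) : Option Int :=
  match L with
  | [] => none
  | (t, p) :: rest => if PySem.Str.isIn t ql then some p else pvFirstP rest ql

theorem pv_foldl_min_const (p : Int) (t : List Int) (h : ∀ x ∈ t, p ≤ x) :
    t.foldl min p = p := by
  induction t generalizing p with
  | nil => rfl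
  | cons a t ih =>
      have ha : p ≤ a := h a (by simp)
      simp only [List.foldl_cons, min_eq_left ha]
      exact ih p (fun x hx => h x (by simp [hx]))

theorem pv_min_head (p : Int) (t : List Int) (h : ∀ x ∈ t, p ≤ x) :
    PySem.List.min? (p :: t) (fun x => x) = some p := by
  rw [PySem.List.min?_id_cons, pv_foldl_min_const p t h]

-- on a priority-sorted flat list, min of the matched priorities = first matched priority
theorem pv_min_filter_eq_first (ql : String) :
    ∀ L : List (String × Int), (L.map Prod.snd).Pairwise (· ≤ ·) →
    PySem.List.min? (L.filterMap (fun tp => if PySem.Str.isIn tp.1 ql then some tp.2 else none))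
      (fun x => x) = pvFirstP L ql := by
  intro L
  induction L with
  | nil => intro _; rfl
  | cons tp rest ih =>
      intro hs
      obtain ⟨t, p⟩ := tp
      simp only [List.map_cons, List.pairwise_cons] at hs
      by_cases h : PySem.Str.isIn t ql
      · simp only [List.filterMap_cons, h, if_pos, pvFirstP]
        refine pv_min_head p _ ?_
        intro x hx
        obtain ⟨⟨t', p'⟩, hmem, hf⟩ := List.mem_filterMap.mp hx
        by_cases h' : PySem.Str.isIn t' ql
        · rw [if_pos h', Option.some.injEq] at hf
          exact hf ▸ hs.1 p' (List.mem_map.mpr ⟨(t', p'), hmem, rfl⟩)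
        · rw [if_neg h'] at hf
          cases hf
      · simp only [List.filterMap_cons, h, pvFirstP, if_false, Bool.false_eq_true]
        exact ih hs.2

-- ===== VERDICT (by name: the statement is the Claim_ definition above) =====
set_option maxHeartbeats 3200000 in
theorem handle_chat_query_spec : Claim_equal_handle_chat_query := by
  intro query _
  unfold Spec_handle_chat_query handle_chat_query handle_chat_query_alt
  simp only [pv_min_filter_eq_first (PySem.Str.lower query) pvB_TRIGGERS (by decide)]
  simp only [pvB_TRIGGERS, pvFirstP]
  by_cases k0 : PySem.Str.isIn "how does this model work" (PySem.Str.lower query)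
  · simp only [pvA_loop, PySem.Dict.items, pvA_model_responses, PySem.Dict.getD, pvA_suggested_questions, pvB_RESPONSES, pvB_SUGGESTED, List.any_cons, List.any_nil, PySem.Dict.get?, eq_self_iff_true, if_true, if_false, Bool.or_false, Bool.or_true, Bool.true_or, Bool.false_or, Bool.false_eq_true, k0]
    try rfl
  by_cases k1 : PySem.Str.isIn "how accurate is this" (PySem.Str.lower query)
  · simp only [pvA_loop, PySem.Dict.items, pvA_model_responses, PySem.Dict.getD, pvA_suggested_questions, pvB_RESPONSES, pvB_SUGGESTED, List.any_cons, List.any_nil, k0, PySem.Dict.get?, eq_self_iff_true, if_true, if_false, Bool.or_false, Bool.or_true, Bool.true_or, Bool.false_or, Bool.false_eq_true, k1]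
    try rfl
  by_cases k2 : PySem.Str.isIn "what features does it check" (PySem.Str.lower query)
  · simp only [pvA_loop, PySem.Dict.items, pvA_model_responses, PySem.Dict.getD, pvA_suggested_questions, pvB_RESPONSES, pvB_SUGGESTED, List.any_cons, List.any_nil, k0, k1, PySem.Dict.get?, eq_self_iff_true, if_true, if_false, Bool.or_false, Bool.or_true, Bool.true_or, Bool.false_or, Bool.false_eq_true, k2]
    try rfl
  by_cases k3 : PySem.Str.isIn "how to spot fake news" (PySem.Str.lower query)
  · simp only [pvA_loop, PySem.Dict.items, pvA_model_responses, PySem.Dict.getD, pvA_suggested_questions, pvB_RESPONSES, pvB_SUGGESTED, List.any_cons, List.any_nil, k0, k1, k2, PySem.Dict.get?, eq_self_iff_true, if_true, if_false, Bool.or_false, Bool.or_true, Bool.true_or, Bool.false_or, Bool.false_eq_true, k3]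
    try rfl
  by_cases k4 : PySem.Str.isIn "what makes news fake" (PySem.Str.lower query)
  · simp only [pvA_loop, PySem.Dict.items, pvA_model_responses, PySem.Dict.getD, pvA_suggested_questions, pvB_RESPONSES, pvB_SUGGESTED, List.any_cons, List.any_nil, k0, k1, k2, k3, PySem.Dict.get?, eq_self_iff_true, if_true, if_false, Bool.or_false, Bool.or_true, Bool.true_or, Bool.false_or, Bool.false_eq_true, k4]
    try rfl
  by_cases k5 : PySem.Str.isIn "work" (PySem.Str.lower query)
  · simp only [pvA_loop, PySem.Dict.items, pvA_model_responses, PySem.Dict.getD, pvA_suggested_questions, pvB_RESPONSES, pvB_SUGGESTED, List.any_cons, List.any_nil, k0, k1, k2, k3, k4, PySem.Dict.get?, eq_self_iff_true, if_true, if_false, Bool.or_false, Bool.or_true, Bool.true_or, Bool.false_or, Bool.false_eq_true, k5]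
    try rfl
  by_cases k6 : PySem.Str.isIn "model" (PySem.Str.lower query)
  · simp only [pvA_loop, PySem.Dict.items, pvA_model_responses, PySem.Dict.getD, pvA_suggested_questions, pvB_RESPONSES, pvB_SUGGESTED, List.any_cons, List.any_nil, k0, k1, k2, k3, k4, k5, PySem.Dict.get?, eq_self_iff_true, if_true, if_false, Bool.or_false, Bool.or_true, Bool.true_or, Bool.false_or, Bool.false_eq_true, k6]
    try rfl
  by_cases k7 : PySem.Str.isIn "algorithm" (PySem.Str.lower query)
  · simp only [pvA_loop, PySem.Dict.items, pvA_model_responses, PySem.Dict.getD, pvA_suggested_questions, pvB_RESPONSES, pvB_SUGGESTED, List.any_cons, List.any_nil, k0, k1, k2, k3, k4, k5, k6, PySem.Dict.get?, eq_self_iff_true, if_true, if_false, Bool.or_false, Bool.or_true, Bool.true_or, Bool.false_or, Bool.false_eq_true, k7]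
    try rfl
  by_cases k8 : PySem.Str.isIn "accurate" (PySem.Str.lower query)
  · simp only [pvA_loop, PySem.Dict.items, pvA_model_responses, PySem.Dict.getD, pvA_suggested_questions, pvB_RESPONSES, pvB_SUGGESTED, List.any_cons, List.any_nil, k0, k1, k2, k3, k4, k5, k6, k7, PySem.Dict.get?, eq_self_iff_true, if_true, if_false, Bool.or_false, Bool.or_true, Bool.true_or, Bool.false_or, Bool.false_eq_true, k8]
    try rfl
  by_cases k9 : PySem.Str.isIn "precision" (PySem.Str.lower query)
  · simp only [pvA_loop, PySem.Dict.items, pvA_model_responses, PySem.Dict.getD, pvA_suggested_questions, pvB_RESPONSES, pvB_SUGGESTED, List.any_cons, List.any_nil, k0, k1, k2, k3, k4, k5, k6, k7, k8, PySem.Dict.get?, eq_self_iff_true, if_true, if_false, Bool.or_false, Bool.or_true, Bool.true_or, Bool.false_or, Bool.false_eq_true, k9]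
    try rfl
  by_cases k10 : PySem.Str.isIn "reliable" (PySem.Str.lower query)
  · simp only [pvA_loop, PySem.Dict.items, pvA_model_responses, PySem.Dict.getD, pvA_suggested_questions, pvB_RESPONSES, pvB_SUGGESTED, List.any_cons, List.any_nil, k0, k1, k2, k3, k4, k5, k6, k7, k8, k9, PySem.Dict.get?, eq_self_iff_true, if_true, if_false, Bool.or_false, Bool.or_true, Bool.true_or, Bool.false_or, Bool.false_eq_true, k10]
    try rfl
  by_cases k11 : PySem.Str.isIn "feature" (PySem.Str.lower query)
  · simp only [pvA_loop, PySem.Dict.items, pvA_model_responses, PySem.Dict.getD, pvA_suggested_questions, pvB_RESPONSES, pvB_SUGGESTED, List.any_cons, List.any_nil, k0, k1, k2, k3, k4, k5, k6, k7, k8, k9, k10, PySem.Dict.get?, eq_self_iff_true, if_true, if_false, Bool.or_false, Bool.or_true, Bool.true_or, Bool.false_or, Bool.false_eq_true, k11]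
    try rfl
  by_cases k12 : PySem.Str.isIn "check" (PySem.Str.lower query)
  · simp only [pvA_loop, PySem.Dict.items, pvA_model_responses, PySem.Dict.getD, pvA_suggested_questions, pvB_RESPONSES, pvB_SUGGESTED, List.any_cons, List.any_nil, k0, k1, k2, k3, k4, k5, k6, k7, k8, k9, k10, k11, PySem.Dict.get?, eq_self_iff_true, if_true, if_false, Bool.or_false, Bool.or_true, Bool.true_or, Bool.false_or, Bool.false_eq_true, k12]
    try rfl
  by_cases k13 : PySem.Str.isIn "look for" (PySem.Str.lower query)
  · simp only [pvA_loop, PySem.Dict.items, pvA_model_responses, PySem.Dict.getD, pvA_suggested_questions, pvB_RESPONSES, pvB_SUGGESTED, List.any_cons, List.any_nil, k0, k1, k2, k3, k4, k5, k6, k7, k8, k9, k10, k11, k12, PySem.Dict.get?, eq_self_iff_true, if_true, if_false, Bool.or_false, Bool.or_true, Bool.true_or, Bool.false_or, Bool.false_eq_true, k13]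
    try rfl
  by_cases k14 : PySem.Str.isIn "spot" (PySem.Str.lower query)
  · simp only [pvA_loop, PySem.Dict.items, pvA_model_responses, PySem.Dict.getD, pvA_suggested_questions, pvB_RESPONSES, pvB_SUGGESTED, List.any_cons, List.any_nil, k0, k1, k2, k3, k4, k5, k6, k7, k8, k9, k10, k11, k12, k13, PySem.Dict.get?, eq_self_iff_true, if_true, if_false, Bool.or_false, Bool.or_true, Bool.true_or, Bool.false_or, Bool.false_eq_true, k14]
    try rfl
  by_cases k15 : PySem.Str.isIn "identify" (PySem.Str.lower query)
  · simp only [pvA_loop, PySem.Dict.items, pvA_model_responses, PySem.Dict.getD, pvA_suggested_questions, pvB_RESPONSES, pvB_SUGGESTED, List.any_cons, List.any_nil, k0, k1, k2, k3, k4, k5, k6, k7, k8, k9, k10, k11, k12, k13, k14, PySem.Dict.get?, eq_self_iff_true, if_true, if_false, Bool.or_false, Bool.or_true, Bool.true_or, Bool.false_or, Bool.false_eq_true, k15]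
    try rfl
  by_cases k16 : PySem.Str.isIn "detect" (PySem.Str.lower query)
  · simp only [pvA_loop, PySem.Dict.items, pvA_model_responses, PySem.Dict.getD, pvA_suggested_questions, pvB_RESPONSES, pvB_SUGGESTED, List.any_cons, List.any_nil, k0, k1, k2, k3, k4, k5, k6, k7, k8, k9, k10, k11, k12, k13, k14, k15, PySem.Dict.get?, eq_self_iff_true, if_true, if_false, Bool.or_false, Bool.or_true, Bool.true_or, Bool.false_or, Bool.false_eq_true, k16]
    try rfl
  by_cases k17 : PySem.Str.isIn "fake" (PySem.Str.lower query)
  · simp only [pvA_loop, PySem.Dict.items, pvA_model_responses, PySem.Dict.getD, pvA_suggested_questions, pvB_RESPONSES, pvB_SUGGESTED, List.any_cons, List.any_nil, k0, k1, k2, k3, k4, k5, k6, k7, k8, k9, k10, k11, k12, k13, k14, k15, k16, PySem.Dict.get?, eq_self_iff_true, if_true, if_false, Bool.or_false, Bool.or_true, Bool.true_or, Bool.false_or, Bool.false_eq_true, k17]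
    try rfl
  by_cases k18 : PySem.Str.isIn "false" (PySem.Str.lower query)
  · simp only [pvA_loop, PySem.Dict.items, pvA_model_responses, PySem.Dict.getD, pvA_suggested_questions, pvB_RESPONSES, pvB_SUGGESTED, List.any_cons, List.any_nil, k0, k1, k2, k3, k4, k5, k6, k7, k8, k9, k10, k11, k12, k13, k14, k15, k16, k17, PySem.Dict.get?, eq_self_iff_true, if_true, if_false, Bool.or_false, Bool.or_true, Bool.true_or, Bool.false_or, Bool.false_eq_true, k18]
    try rfl
  by_cases k19 : PySem.Str.isIn "misinformation" (PySem.Str.lower query)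
  · simp only [pvA_loop, PySem.Dict.items, pvA_model_responses, PySem.Dict.getD, pvA_suggested_questions, pvB_RESPONSES, pvB_SUGGESTED, List.any_cons, List.any_nil, k0, k1, k2, k3, k4, k5, k6, k7, k8, k9, k10, k11, k12, k13, k14, k15, k16, k17, k18, PySem.Dict.get?, eq_self_iff_true, if_true, if_false, Bool.or_false, Bool.or_true, Bool.true_or, Bool.false_or, Bool.false_eq_true, k19]
    try rfl
  · simp only [pvA_loop, PySem.Dict.items, pvA_model_responses, PySem.Dict.getD, pvA_suggested_questions, pvB_RESPONSES, pvB_SUGGESTED, List.any_cons, List.any_nil, k0, k1, k2, k3, k4, k5, k6, k7, k8, k9, k10, k11, k12, k13, k14, k15, k16, k17, k18, PySem.Dict.get?, eq_self_iff_true, if_true, if_false, Bool.or_false, Bool.or_true, Bool.true_or, Bool.false_or, Bool.false_eq_true, k19]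
    try rfl
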